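-- pv_equiv track=rewrite | github.com/grahama1970/fetcher | src/fetcher/workflows/fetcher_utils.py | is_safe_domain
-- ===== SOURCE A (Python) =====
-- from typing import Iterable, List, Set, TYPE_CHECKING
--
-- def idna_normalize(host: str) -> str:
--     """Return a lowercase, IDNA-normalized host name."""
--
--     h = (host or "").strip().rstrip(".").lower()
--     if not h:
--         return ""
--     try:
--         h = h.encode("idna").decode("ascii")
--     except Exception:
--         pass
--     return h
--
-- def normalize_domain(domain: str, strip_subdomains: Set[str]) -> str:
--     """Normalize a domain, optionally stripping well-known subdomains."""
--
--     d = idna_normalize(domain)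
--     if not d:
--         return d
--     labels = d.split(".")
--     if len(labels) > 2 and labels[0] in strip_subdomains:
--         return ".".join(labels[1:])
--     return d
--
-- def is_safe_domain(
--     domain: str,
--     safe_domains: Set[str],
--     safe_suffixes: Iterable[str],
--     strip_subdomains: Set[str] | None = None,
-- ) -> bool:
--     """Return True when the domain matches an explicit list or suffix."""
--
--     strip = strip_subdomains or set()
--     normalized = normalize_domain(domain, strip)
--     if not normalized:
--         return False
--     if normalized in safe_domains:
--         return True
--     for suffix in safe_suffixes:
--         token = (suffix or "").strip().lower()
--         if not token:
--             continue
--         if not token.startswith("."):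
--             token = f".{token}"
--         if normalized.endswith(token):
--             return True
--     return False
-- ===== SOURCE B (Python) =====
-- from typing import Iterable, List, Set
--
--
-- def idna_normalize(host: str) -> str:
--     """Return a lowercase, IDNA-normalized host name."""
--
--     h = (host or "").strip().rstrip(".").lower()
--     if not h:
--         return ""
--     try:
--         h = h.encode("idna").decode("ascii")
--     except Exception:
--         pass
--     return h
--
--
-- def normalize_domain(domain: str, strip_subdomains: Set[str]) -> str:
--     """Normalize a domain, optionally stripping well-known subdomains."""
--
--     d = idna_normalize(domain)
--     if not d:
--         return d
--     labels = d.split(".")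
--     if len(labels) > 2 and labels[0] in strip_subdomains:
--         return ".".join(labels[1:])
--     return d
--
--
-- def is_safe_domain(
--     domain: str,
--     safe_domains: Set[str],
--     safe_suffixes: Iterable[str],
--     strip_subdomains: Set[str] | None = None,
-- ) -> bool:
--     """Return True when the domain matches an explicit list or suffix.
--
--     Instead of endswith-testing every suffix against the domain, normalize the
--     suffixes once into a set of dotted tokens and probe the domain's own
--     label-suffixes against that set.
--     """
--
--     tokens = set()
--     for suffix in safe_suffixes:
--         t = (suffix or "").strip().lower()
--         if t:
--             tokens.add(t if t.startswith(".") else "." + t)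
--     normalized = normalize_domain(domain, strip_subdomains or set())
--     if not normalized:
--         return False
--     if normalized in safe_domains:
--         return True
--     labels = normalized.split(".")
--     return any("." + ".".join(labels[i:]) in tokens for i in range(1, len(labels)))
-- ===== Notes on version B (the rewrite author's own statement) =====
-- stated objective: alternative
-- what changed: B normalizes the suffixes once into a set of dotted tokens and then probes the domain's own proper label-suffixes against that set, instead of endswith-testing every suffix against the domain.
import Mathlib
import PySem

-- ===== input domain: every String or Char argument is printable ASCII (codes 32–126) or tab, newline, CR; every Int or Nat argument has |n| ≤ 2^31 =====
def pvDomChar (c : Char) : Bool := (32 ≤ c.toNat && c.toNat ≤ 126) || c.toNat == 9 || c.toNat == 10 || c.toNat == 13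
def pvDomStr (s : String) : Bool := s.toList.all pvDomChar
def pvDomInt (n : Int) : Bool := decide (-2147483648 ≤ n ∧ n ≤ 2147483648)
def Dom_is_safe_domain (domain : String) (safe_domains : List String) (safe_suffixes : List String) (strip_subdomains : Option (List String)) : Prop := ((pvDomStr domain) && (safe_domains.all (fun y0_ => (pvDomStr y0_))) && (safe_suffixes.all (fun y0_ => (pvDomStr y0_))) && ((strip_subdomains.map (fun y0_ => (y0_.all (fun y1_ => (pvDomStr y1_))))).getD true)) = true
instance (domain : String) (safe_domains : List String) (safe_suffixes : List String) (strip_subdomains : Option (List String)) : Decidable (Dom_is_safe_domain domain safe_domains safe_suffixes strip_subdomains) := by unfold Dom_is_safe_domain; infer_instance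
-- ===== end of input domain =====

-- B replaces A's "endswith-test every suffix" loop by a set of dotted suffix tokens probed
-- with the domain's own label-suffixes (objective: alternative decomposition, same cost here).

-- ===== PORT A =====

-- hand port of Python's str.rstrip(".") (PySem has no rstrip-with-chars); exact: drops trailing '.'
def pyRstripDots (s : List Char) : List Char := (s.reverse.dropWhile (· == '.')).reverse

-- port of idna_normalize. `h.encode("idna").decode("ascii")` is the identity on the stated
-- ASCII domain whenever it does not raise, and the `except: pass` keeps h unchanged when it
-- raises, so on the ASCII domain the try-block is the identity and is ported as such.
def pyIdnaNormalize (host : String) : List Char :=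
  PySem.Chars.lower (pyRstripDots (PySem.Chars.strip host.toList))

-- port of normalize_domain (strip_subdomains already materialised as a list of strings)
def pyNormalizeDomain (domain : String) (strip : List String) : List Char :=
  let d := pyIdnaNormalize domain
  if d = [] then d
  else
    let labels := PySem.Chars.splitOn d ['.']
    if 2 < labels.length ∧ strip.contains (String.ofList (labels.headD [])) then
      PySem.Chars.join ['.'] labels.tail
    else d

def is_safe_domain (domain : String) (safe_domains : List String) (safe_suffixes : List String) (strip_subdomains : Option (List String)) : Bool :=
  let strip := strip_subdomains.getD []      -- `strip_subdomains or set()`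
  let normalized := pyNormalizeDomain domain strip
  if normalized = [] then false
  else if safe_domains.contains (String.ofList normalized) then true
  else
    safe_suffixes.any (fun suffix =>
      let token := PySem.Chars.lower (PySem.Chars.strip suffix.toList)
      if token = [] then false   -- `continue`
      else
        let token := if PySem.Chars.startswith token ['.'] then token else '.' :: token
        PySem.Chars.endswith normalized token)

-- ===== PORT B =====

def is_safe_domain_alt (domain : String) (safe_domains : List String) (safe_suffixes : List String) (strip_subdomains : Option (List String)) : Bool :=
  let tokens : PySem.Set (List Char) :=
    safe_suffixes.foldl (fun s suffix =>
      let t := PySem.Chars.lower (PySem.Chars.strip suffix.toList)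
      if t = [] then s
      else s.add (if PySem.Chars.startswith t ['.'] then t else '.' :: t))
      (PySem.Set.ofList [])
  let normalized := pyNormalizeDomain domain (strip_subdomains.getD [])
  if normalized = [] then false
  else if safe_domains.contains (String.ofList normalized) then true
  else
    let labels := PySem.Chars.splitOn normalized ['.']
    (PySem.List.pyRange 1 labels.length 1).any (fun i =>
      tokens.contains ('.' :: PySem.Chars.join ['.'] (PySem.List.slice labels (some i) none)))

-- ===== PRECONDITION & SPEC =====
def Spec_is_safe_domain (domain : String) (safe_domains : List String) (safe_suffixes : List String) (strip_subdomains : Option (List String)) (out : Bool) : Prop := out = is_safe_domain_alt domain safe_domains safe_suffixes strip_subdomains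
instance (domain : String) (safe_domains : List String) (safe_suffixes : List String) (strip_subdomains : Option (List String)) (out : Bool) : Decidable (Spec_is_safe_domain domain safe_domains safe_suffixes strip_subdomains out) := by unfold Spec_is_safe_domain; infer_instance

-- ===== CLAIM (what is proved, stated in full; the proofs are below) =====
def Claim_equal_is_safe_domain : Prop := ∀ (domain : String) (safe_domains : List String) (safe_suffixes : List String) (strip_subdomains : Option (List String)), Dom_is_safe_domain domain safe_domains safe_suffixes strip_subdomains → Spec_is_safe_domain domain safe_domains safe_suffixes strip_subdomains (is_safe_domain domain safe_domains safe_suffixes strip_subdomains)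

-- ===== LEMMAS AND PROOFS =====

-- simple recursive characterisation of splitOn on the single-char separator '.'
def split1 (pre : List Char) : List Char → List (List Char)
  | [] => [pre]
  | c :: rest => if c = '.' then pre :: split1 [] rest else split1 (pre ++ [c]) rest

theorem splitOn_go_eq (fuel : Nat) (l cur : List Char) (acc : List (List Char))
    (h : l.length < fuel) :
    PySem.Chars.splitOn.go ['.'] fuel l cur acc = acc.reverse ++ split1 cur.reverse l := by
  induction fuel generalizing l cur acc with
  | zero => omega
  | succ n ih =>
    cases l with
    | nil => simp [PySem.Chars.splitOn.go, split1]
    | cons c rest =>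
      simp only [PySem.Chars.splitOn.go, List.isPrefixOf, List.length_cons]
      by_cases hc : c = '.'
      · subst hc
        simp only [beq_self_eq_true, Bool.true_and, if_pos,
          List.drop_succ_cons, List.length_nil, List.drop_zero]
        rw [ih rest [] _ (by simp at h; omega)]
        simp [split1]
      · rw [if_neg (by simp; intro hh; exact absurd hh.symm hc)]
        rw [ih rest (c :: cur) acc (by simp at h ⊢; omega)]
        simp [split1, hc]

theorem splitOn_eq_split1 (s : List Char) :
    PySem.Chars.splitOn s ['.'] = split1 [] s := by
  simp [PySem.Chars.splitOn, splitOn_go_eq (s.length + 1) s [] [] (by omega)]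

theorem split1_ne_nil (pre l : List Char) : split1 pre l ≠ [] := by
  induction l generalizing pre with
  | nil => simp [split1]
  | cons c rest ih =>
    simp only [split1]
    split_ifs with hc
    · simp
    · exact ih _

theorem intercalate_cons₂ (x y : List Char) (ys : List (List Char)) :
    List.intercalate ['.'] (x :: y :: ys) = x ++ ['.'] ++ List.intercalate ['.'] (y :: ys) := by
  simp [List.intercalate, List.intersperse]

theorem intercalate_split1 (l pre : List Char) :
    List.intercalate ['.'] (split1 pre l) = pre ++ l := by
  induction l generalizing pre with
  | nil => simp [split1, List.intercalate]
  | cons c rest ih =>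
    simp only [split1]
    split_ifs with hc
    · subst hc
      cases h : split1 [] rest with
      | nil => exact absurd h (split1_ne_nil _ _)
      | cons a as =>
        have h2 := ih ([] : List Char)
        rw [h] at h2
        rw [intercalate_cons₂]
        simp only [List.nil_append] at h2
        rw [h2]
        simp
    · rw [ih]
      simp

theorem split1_append (u v pre : List Char) :
    split1 pre (u ++ '.' :: v) = split1 pre u ++ split1 [] v := by
  induction u generalizing pre with
  | nil => simp [split1]
  | cons c rest ih =>
    simp only [List.cons_append, split1]
    split_ifs with hc
    · simp [ih]
    · exact ih _

theorem suffix_intercalate_drop (ls : List (List Char)) (i : Nat)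
    (h1 : 1 ≤ i) (h2 : i < ls.length) :
    ('.' :: List.intercalate ['.'] (ls.drop i)) <:+ List.intercalate ['.'] ls := by
  induction ls generalizing i with
  | nil => simp at h2
  | cons a rest ih =>
    cases rest with
    | nil => simp at h2; omega
    | cons b rs =>
      rw [intercalate_cons₂]
      rcases Nat.eq_or_lt_of_le h1 with he | hlt
      · subst he
        simp only [List.drop_succ_cons, List.drop_zero]
        exact ⟨a, by simp⟩
      · have h1' : 1 ≤ i - 1 := by omega
        have h2' : i - 1 < (b :: rs).length := by simp at h2 ⊢; omega
        have := ih (i - 1) h1' h2'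
        have hdrop : (a :: b :: rs).drop i = (b :: rs).drop (i - 1) := by
          cases i with
          | zero => omega
          | succ k => simp
        rw [hdrop]
        exact this.trans (List.suffix_append _ _)

-- the crux: a "dotted" suffix matches iff it is one of the domain's proper label-suffixes
theorem endswith_dot_iff (d t : List Char) :
    PySem.Chars.endswith d ('.' :: t) = true ↔
      ∃ i : Nat, 1 ≤ i ∧ i < (split1 [] d).length ∧
        List.intercalate ['.'] ((split1 [] d).drop i) = t := by
  rw [PySem.Chars.endswith_iff]
  constructor
  · rintro ⟨u, hu⟩
    refine ⟨(split1 [] u).length, ?_, ?_, ?_⟩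
    · have := split1_ne_nil ([] : List Char) u
      cases h : split1 [] u with
      | nil => exact absurd h this
      | cons a as => simp
    · rw [← hu, split1_append]
      have := split1_ne_nil ([] : List Char) t
      cases h : split1 [] t with
      | nil => exact absurd h this
      | cons a as => simp
    · rw [← hu, split1_append, List.drop_append_of_le_length (le_refl _)]
      simp [intercalate_split1]
  · rintro ⟨i, h1, h2, ht⟩
    rw [← ht]
    have := suffix_intercalate_drop (split1 [] d) i h1 h2
    rwa [intercalate_split1, List.nil_append] at this

theorem mem_tokens_iff (l : List String) (x : List Char) :
    x ∈ (l.foldl (fun s suffix =>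
      let t := PySem.Chars.lower (PySem.Chars.strip suffix.toList)
      if t = [] then s
      else s.add (if PySem.Chars.startswith t ['.'] then t else '.' :: t))
      (PySem.Set.ofList [])) ↔
    ∃ suffix ∈ l,
      (PySem.Chars.lower (PySem.Chars.strip suffix.toList) ≠ []) ∧
      ((if PySem.Chars.startswith (PySem.Chars.lower (PySem.Chars.strip suffix.toList)) ['.']
        then PySem.Chars.lower (PySem.Chars.strip suffix.toList)
        else '.' :: PySem.Chars.lower (PySem.Chars.strip suffix.toList)) = x) := by
  have gen : ∀ (l : List String) (s0 : PySem.Set (List Char)),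
      x ∈ (l.foldl (fun s suffix =>
        let t := PySem.Chars.lower (PySem.Chars.strip suffix.toList)
        if t = [] then s
        else s.add (if PySem.Chars.startswith t ['.'] then t else '.' :: t)) s0) ↔
      (x ∈ s0 ∨ ∃ suffix ∈ l,
        (PySem.Chars.lower (PySem.Chars.strip suffix.toList) ≠ []) ∧
        ((if PySem.Chars.startswith (PySem.Chars.lower (PySem.Chars.strip suffix.toList)) ['.']
          then PySem.Chars.lower (PySem.Chars.strip suffix.toList)
          else '.' :: PySem.Chars.lower (PySem.Chars.strip suffix.toList)) = x)) := by
    intro l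
    induction l with
    | nil => simp
    | cons a rest ih =>
      intro s0
      simp only [List.foldl_cons]
      rw [ih]
      by_cases ha : PySem.Chars.lower (PySem.Chars.strip a.toList) = []
      · simp [ha]
      · simp only [if_neg ha, PySem.Set.mem_add, List.mem_cons]
        constructor
        · rintro ((hs | he) | ⟨suf, hm, hne, he⟩)
          exacts [Or.inl hs, Or.inr ⟨a, Or.inl rfl, ha, he.symm⟩, Or.inr ⟨suf, Or.inr hm, hne, he⟩]
        · rintro (hs | ⟨suf, hm, hne, he⟩)
          · exact Or.inl (Or.inl hs)
          · rcases hm with rfl | hm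
            · exact Or.inl (Or.inr he.symm)
            · exact Or.inr ⟨suf, hm, hne, he⟩
  rw [gen]
  simp

theorem mem_pyRange_one (n i : Int) :
    i ∈ PySem.List.pyRange 1 n 1 ↔ 1 ≤ i ∧ i < n := by
  simp only [PySem.List.pyRange]
  norm_num
  constructor
  · rintro ⟨k, hk, rfl⟩
    split_ifs at hk with h <;> omega
  · rintro ⟨h1, h2⟩
    refine ⟨(i - 1).toNat, ?_, by omega⟩
    rw [if_pos (by omega)]
    omega

-- the "dotted" token always has the shape '.' :: b
theorem dotted_shape (t : List Char) :
    ∃ b, (if PySem.Chars.startswith t ['.'] then t else '.' :: t) = '.' :: b := by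
  split_ifs with h
  · rcases (PySem.Chars.startswith_iff t ['.']).mp h with ⟨r, hr⟩
    exact ⟨r, hr.symm⟩
  · exact ⟨t, rfl⟩

-- ===== VERDICT (by name: the statement is the Claim_ definition above) =====
theorem is_safe_domain_spec : Claim_equal_is_safe_domain := by
  intro domain safe_domains safe_suffixes strip_subdomains _hdom
  show is_safe_domain domain safe_domains safe_suffixes strip_subdomains =
    is_safe_domain_alt domain safe_domains safe_suffixes strip_subdomains
  simp only [is_safe_domain, is_safe_domain_alt]
  by_cases hn : pyNormalizeDomain domain (strip_subdomains.getD []) = []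
  · simp [hn]
  · rw [if_neg hn, if_neg hn]
    by_cases hm : safe_domains.contains
        (String.ofList (pyNormalizeDomain domain (strip_subdomains.getD []))) = true
    · rw [if_pos hm, if_pos hm]
    · rw [if_neg hm, if_neg hm]
      set d := pyNormalizeDomain domain (strip_subdomains.getD []) with hd
      rw [Bool.eq_iff_iff, List.any_eq_true, List.any_eq_true]
      rw [splitOn_eq_split1]
      constructor
      · rintro ⟨suffix, hmem, hp⟩
        set t := PySem.Chars.lower (PySem.Chars.strip suffix.toList) with htdef
        by_cases ht : t = []
        · rw [if_pos ht] at hp; exact absurd hp (by simp)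
        · rw [if_neg ht] at hp
          obtain ⟨b, hb⟩ := dotted_shape t
          rw [hb] at hp
          obtain ⟨i, h1, h2, h3⟩ := (endswith_dot_iff d b).mp hp
          refine ⟨(i : Int), (mem_pyRange_one (split1 [] d).length i).mpr (by omega), ?_⟩
          rw [PySem.Chars.join, PySem.List.slice_from (split1 [] d) (by omega : (0:Int) ≤ (i : Int)),
            Int.toNat_natCast, PySem.Set.contains_iff, mem_tokens_iff]
          exact ⟨suffix, hmem, ht, by rw [hb, h3]⟩
      · rintro ⟨i, hir, hp⟩
        obtain ⟨h1, h2⟩ := (mem_pyRange_one (split1 [] d).length i).mp hir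
        rw [PySem.Chars.join, PySem.List.slice_from (split1 [] d) (by omega : (0:Int) ≤ i),
          PySem.Set.contains_iff, mem_tokens_iff] at hp
        obtain ⟨suffix, hmem, ht, he⟩ := hp
        refine ⟨suffix, hmem, ?_⟩
        rw [if_neg ht]
        obtain ⟨b, hb⟩ := dotted_shape (PySem.Chars.lower (PySem.Chars.strip suffix.toList))
        rw [hb] at he ⊢
        apply (endswith_dot_iff d b).mpr
        refine ⟨i.toNat, by omega, by omega, ?_⟩
        have hbe : b = List.intercalate ['.'] ((split1 [] d).drop i.toNat) := by
          have := he.symm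
          injection this with _ h
          exact h.symm
        rw [hbe]
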